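-- pv_equiv track=rewrite | github.com/albrunj/production_database_scripts | strips/sensors/sensor_tests_interfacing_functions_itkdb/ImportData.py | IsBatchFormat
-- ===== SOURCE A (Python) =====
-- import string
--
-- upperletters=string.ascii_uppercase
--
-- numbers=string.digits
--
-- def IsBatchFormat(Input):
--     if Input is None:
--         return False
--     if type(Input) is not str:
--         return False
--     for char in Input:
--         if char not in upperletters+numbers:
--             return False
--     if len(Input)<=2:
--         return False
--     if Input[0] not in ['U','V']:
--         return False
--     try:
--         int(Input[-1])
--     except:
--         return False
--     LetterPortion=True
--     for char in Input:
--         if LetterPortion==True: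
--             if char not in upperletters:
--                 LetterPortion=False
--         elif LetterPortion==False:
--             if char not in numbers:
--                 return False
--     return True
-- ===== SOURCE B (Python) =====
-- import re
--
-- _BATCH_RE = re.compile(r'[UV][A-Z]*[0-9]+')
--
-- def IsBatchFormat(Input):
--     if type(Input) is not str:
--         return False
--     return _BATCH_RE.fullmatch(Input) is not None and len(Input) > 2
-- ===== Notes on version B (the rewrite author's own statement) =====
-- stated objective: idiomatic
-- what changed: Replaces A's two manual character scans plus a try/except int() probe with a single compiled regex fullmatch r'[UV][A-Z]*[0-9]+' and a length guard.
import Mathlib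
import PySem

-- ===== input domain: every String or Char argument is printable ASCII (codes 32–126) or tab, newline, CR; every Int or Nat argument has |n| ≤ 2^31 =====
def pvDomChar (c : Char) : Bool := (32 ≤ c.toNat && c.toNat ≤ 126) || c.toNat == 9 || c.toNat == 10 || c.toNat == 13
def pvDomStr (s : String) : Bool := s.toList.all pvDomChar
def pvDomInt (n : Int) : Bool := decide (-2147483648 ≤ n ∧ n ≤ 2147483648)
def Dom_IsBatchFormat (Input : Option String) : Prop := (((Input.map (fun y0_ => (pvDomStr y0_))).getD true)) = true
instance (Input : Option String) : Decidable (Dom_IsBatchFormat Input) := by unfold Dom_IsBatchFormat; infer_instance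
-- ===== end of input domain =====

-- B replaces A's two manual scans and try/except int() probe by a single regex-style
-- fullmatch of [UV][A-Z]*[0-9]+ plus a length guard (objective: idiomatic).

-- ===== PORT A =====
-- module constants string.ascii_uppercase and string.digits
def upperletters : String := "ABCDEFGHIJKLMNOPQRSTUVWXYZ"
def numbers : String := "0123456789"

-- second loop of A: the LetterPortion state machine (early return False = result false)
def aLoop2 : List Char → Bool → Bool
  | [], _ => true
  | c :: cs, true => aLoop2 cs (upperletters.toList.contains c)
  | c :: cs, false => if numbers.toList.contains c then aLoop2 cs false else false

def IsBatchFormat (Input : Option String) : Bool :=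
  match Input with
  | none => false                       -- Input is None → False (type(Input) is str otherwise)
  | some s =>
    let chars := s.toList
    -- first loop: every char must be in upperletters+numbers
    if !(chars.all (fun c => ((upperletters ++ numbers).toList).contains c)) then false
    else if chars.length ≤ 2 then false
    else if !(['U','V'].contains (chars.headD ' ')) then false   -- Input[0]; chars ≠ [] here (len > 2)
    else if (PySem.Int.ofChars? [chars.getLastD ' ']).isNone then false  -- try: int(Input[-1]); chars ≠ [] here
    else aLoop2 chars true

-- ===== PORT B =====
-- regex character classes [A-Z] and [0-9]
def bUpper (c : Char) : Bool := 'A' ≤ c && c ≤ 'Z'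
def bDigit (c : Char) : Bool := '0' ≤ c && c ≤ '9'

-- fullmatch of r'[UV][A-Z]*[0-9]+' against the char list
def bFullmatch : List Char → Bool
  | [] => false
  | c :: rest =>
    let t := rest.dropWhile bUpper          -- [A-Z]* consumes the letter run
    (c == 'U' || c == 'V') && (!t.isEmpty && t.all bDigit)   -- [0-9]+ must take all of the remainder

def IsBatchFormat_alt (Input : Option String) : Bool :=
  match Input with
  | none => false
  | some s => bFullmatch s.toList && decide (2 < s.toList.length)

-- ===== PRECONDITION & SPEC =====
def Spec_IsBatchFormat (Input : Option String) (out : Bool) : Prop := out = IsBatchFormat_alt Input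
instance (Input : Option String) (out : Bool) : Decidable (Spec_IsBatchFormat Input out) := by unfold Spec_IsBatchFormat; infer_instance

-- ===== CLAIM (what is proved, stated in full; the proofs are below) =====
def Claim_equal_IsBatchFormat : Prop := ∀ (Input : Option String), Dom_IsBatchFormat Input → Spec_IsBatchFormat Input (IsBatchFormat Input)

-- ===== LEMMAS AND PROOFS =====

lemma char_le_iff (a b : Char) : (a ≤ b) ↔ a.toNat ≤ b.toNat := by
  rw [Char.le_def]; exact UInt32.le_iff_toNat_le

lemma char_eq_iff (a b : Char) : (a = b) ↔ a.toNat = b.toNat := by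
  constructor
  · rintro rfl; rfl
  · intro h; exact Char.ext (UInt32.toNat_inj.mp h)

set_option maxRecDepth 8000 in
lemma upper_toList :
    upperletters.toList = ['A','B','C','D','E','F','G','H','I','J','K','L','M',
      'N','O','P','Q','R','S','T','U','V','W','X','Y','Z'] := by decide

set_option maxRecDepth 8000 in
lemma numbers_toList : numbers.toList = ['0','1','2','3','4','5','6','7','8','9'] := by decide

set_option maxRecDepth 8000 in
lemma allow_toList :
    (upperletters ++ numbers).toList = ['A','B','C','D','E','F','G','H','I','J','K','L','M',
      'N','O','P','Q','R','S','T','U','V','W','X','Y','Z','0','1','2','3','4','5','6','7','8','9'] := by decide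

lemma upperC_eq (c : Char) : upperletters.toList.contains c = bUpper c := by
  rw [upper_toList, Bool.eq_iff_iff]
  simp only [List.contains_eq_mem, decide_eq_true_eq, List.mem_cons, List.not_mem_nil, or_false,
    bUpper, Bool.and_eq_true, decide_eq_true_eq, char_le_iff, char_eq_iff, show ('A' : Char).toNat = 65 from rfl, show ('B' : Char).toNat = 66 from rfl, show ('C' : Char).toNat = 67 from rfl, show ('D' : Char).toNat = 68 from rfl, show ('E' : Char).toNat = 69 from rfl, show ('F' : Char).toNat = 70 from rfl, show ('G' : Char).toNat = 71 from rfl, show ('H' : Char).toNat = 72 from rfl, show ('I' : Char).toNat = 73 from rfl, show ('J' : Char).toNat = 74 from rfl, show ('K' : Char).toNat = 75 from rfl, show ('L' : Char).toNat = 76 from rfl, show ('M' : Char).toNat = 77 from rfl, show ('N' : Char).toNat = 78 from rfl, show ('O' : Char).toNat = 79 from rfl, show ('P' : Char).toNat = 80 from rfl, show ('Q' : Char).toNat = 81 from rfl, show ('R' : Char).toNat = 82 from rfl, show ('S' : Char).toNat = 83 from rfl, show ('T' : Char).toNat = 84 from rfl, show ('U' : Char).toNat = 85 from rfl, show ('V'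 : Char).toNat = 86 from rfl, show ('W' : Char).toNat = 87 from rfl, show ('X' : Char).toNat = 88 from rfl, show ('Y' : Char).toNat = 89 from rfl, show ('Z' : Char).toNat = 90 from rfl]
  omega

lemma digitC_eq (c : Char) : numbers.toList.contains c = bDigit c := by
  rw [numbers_toList, Bool.eq_iff_iff]
  simp only [List.contains_eq_mem, decide_eq_true_eq, List.mem_cons, List.not_mem_nil, or_false,
    bDigit, Bool.and_eq_true, decide_eq_true_eq, char_le_iff, char_eq_iff, show ('0' : Char).toNat = 48 from rfl, show ('1' : Char).toNat = 49 from rfl, show ('2' : Char).toNat = 50 from rfl, show ('3' : Char).toNat = 51 from rfl, show ('4' : Char).toNat = 52 from rfl, show ('5' : Char).toNat = 53 from rfl, show ('6' : Char).toNat = 54 from rfl, show ('7' : Char).toNat = 55 from rfl, show ('8' : Char).toNat = 56 from rfl, show ('9' : Char).toNat = 57 from rfl]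
  omega

lemma allowC_eq (c : Char) :
    ((upperletters ++ numbers).toList).contains c = (bUpper c || bDigit c) := by
  rw [allow_toList, Bool.eq_iff_iff]
  simp only [List.contains_eq_mem, decide_eq_true_eq, List.mem_cons, List.not_mem_nil, or_false,
    bUpper, bDigit, Bool.or_eq_true, Bool.and_eq_true, decide_eq_true_eq, char_le_iff, char_eq_iff,
    show ('A' : Char).toNat = 65 from rfl, show ('B' : Char).toNat = 66 from rfl, show ('C' : Char).toNat = 67 from rfl, show ('D' : Char).toNat = 68 from rfl, show ('E' : Char).toNat = 69 from rfl, show ('F' : Char).toNat = 70 from rfl, show ('G' : Char).toNat = 71 from rfl, show ('H' : Char).toNat = 72 from rfl, show ('I' : Char).toNat = 73 from rfl, show ('J' : Char).toNat = 74 from rfl, show ('K' : Char).toNat = 75 from rfl, show ('L' : Char).toNat = 76 from rfl, show ('M' : Char).toNat = 77 from rfl, show ('N' : Char).toNat = 78 from rfl, show ('O' : Char).toNat = 79 from rfl, show ('P' : Char).toNat = 80 from rfl, show ('Q' : Char).toNat = 81 from rfl, show ('R' : Char).toNat = 82 from rfl, show ('S' : Char).toNat = 83 from rfl, show ('T' :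 Char).toNat = 84 from rfl, show ('U' : Char).toNat = 85 from rfl, show ('V' : Char).toNat = 86 from rfl, show ('W' : Char).toNat = 87 from rfl, show ('X' : Char).toNat = 88 from rfl, show ('Y' : Char).toNat = 89 from rfl, show ('Z' : Char).toNat = 90 from rfl, show ('0' : Char).toNat = 48 from rfl, show ('1' : Char).toNat = 49 from rfl, show ('2' : Char).toNat = 50 from rfl, show ('3' : Char).toNat = 51 from rfl, show ('4' : Char).toNat = 52 from rfl, show ('5' : Char).toNat = 53 from rfl, show ('6' : Char).toNat = 54 from rfl, show ('7' : Char).toNat = 55 from rfl, show ('8' : Char).toNat = 56 from rfl, show ('9' : Char).toNat = 57 from rfl]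
  omega

lemma upper_not_digit (c : Char) (h : bUpper c = true) : bDigit c = false := by
  simp only [bUpper, bDigit, Bool.and_eq_true, decide_eq_true_eq, char_le_iff,
    Bool.and_eq_false_iff, decide_eq_false_iff_not, not_le,
    show ('A' : Char).toNat = 65 from rfl, show ('Z' : Char).toNat = 90 from rfl,
    show ('0' : Char).toNat = 48 from rfl, show ('9' : Char).toNat = 57 from rfl] at *
  omega

-- int() on a single character from upperletters+numbers succeeds exactly on the digits
lemma ofChars_single (c : Char) (h : (bUpper c || bDigit c) = true) :
    (PySem.Int.ofChars? [c]).isNone = !bDigit c := by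
  have hm : c ∈ (upperletters ++ numbers).toList := by
    have h2 : ((upperletters ++ numbers).toList).contains c = true := by rw [allowC_eq]; exact h
    simpa using h2
  rw [allow_toList] at hm
  fin_cases hm <;> decide

lemma aLoop2_false (l : List Char) :
    aLoop2 l false = l.all (fun c => numbers.toList.contains c) := by
  induction l with
  | nil => rfl
  | cons c cs ih => by_cases h : numbers.toList.contains c <;> simp [aLoop2, h, ih]

lemma aLoop2_true (l : List Char)
    (h : ∀ x ∈ l, (bUpper x || bDigit x) = true) :
    aLoop2 l true = (l.dropWhile bUpper).all bDigit := by
  induction l with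
  | nil => rfl
  | cons c cs ih =>
    by_cases hc : bUpper c
    · simp only [aLoop2, upperC_eq, hc, List.dropWhile_cons_of_pos]
      exact ih fun x hx => h x (List.mem_cons_of_mem _ hx)
    · have hd : bDigit c = true := by
        have := h c (List.mem_cons_self ..)
        simpa [hc] using this
      have hc' : bUpper c = false := by simpa using hc
      have hall : cs.all (fun x => numbers.toList.contains x) = cs.all bDigit := by
        simp only [digitC_eq]
      rw [show aLoop2 (c :: cs) true = aLoop2 cs (upperletters.toList.contains c) from rfl,
        upperC_eq, hc', aLoop2_false, hall,
        List.dropWhile_cons_of_neg (by simp [hc']), List.all_cons, hd, Bool.true_and]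

-- a true fullmatch means every character is an uppercase letter or digit
lemma bFullmatch_all (c : Char) (rest : List Char) (h : bFullmatch (c :: rest) = true) :
    ∀ x ∈ c :: rest, (bUpper x || bDigit x) = true := by
  simp only [bFullmatch, Bool.and_eq_true, Bool.or_eq_true, beq_iff_eq] at h
  obtain ⟨huv, _, hall⟩ := h
  intro x hx
  rcases List.mem_cons.mp hx with rfl | hx
  · rcases huv with rfl | rfl <;> decide
  · rw [← List.takeWhile_append_dropWhile (p := bUpper) (l := rest)] at hx
    rcases List.mem_append.mp hx with hx | hx
    · simp [List.mem_takeWhile_imp hx]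
    · simp [List.all_eq_true.mp hall x hx]

lemma chain_bool (a : Bool) (p : Prop) [Decidable p] (c d e : Bool) :
    (if !a then false else if p then false else if !c then false else if d then false else e)
    = (a && !(decide p) && c && !d && e) := by
  by_cases hp : p <;> cases a <;> cases c <;> cases d <;> cases e <;> simp [hp]

theorem IsBatchFormat_spec : Claim_equal_IsBatchFormat := by
  intro Input _
  unfold Spec_IsBatchFormat IsBatchFormat IsBatchFormat_alt
  cases Input with
  | none => rfl
  | some s =>
    simp only []
    generalize s.toList = l
    rw [chain_bool]
    cases l with
    | nil => decide
    | cons c rest =>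
      by_cases hlen : (c :: rest).length ≤ 2
      · have h2 : (!decide ((c :: rest).length ≤ 2)) = false := by
          simp at hlen ⊢; omega
        have h2' : decide (2 < (c :: rest).length) = false := by
          simp at hlen ⊢; omega
        rw [h2, h2', Bool.and_false, Bool.and_false, Bool.false_and, Bool.false_and, Bool.false_and]
      · have h2 : (!decide ((c :: rest).length ≤ 2)) = true := by
          simp at hlen ⊢; omega
        have h2' : decide (2 < (c :: rest).length) = true := by
          simp at hlen ⊢; omega
        cases hbf : bFullmatch (c :: rest) with
        | true =>
          -- B accepts: show every factor of A's chain is true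
          have hall := bFullmatch_all c rest hbf
          have hallA : (c :: rest).all (fun x => ((upperletters ++ numbers).toList).contains x) = true := by
            simp only [List.all_eq_true, allowC_eq]; exact hall
          have hbf' := hbf
          simp only [bFullmatch, Bool.and_eq_true, Bool.or_eq_true, beq_iff_eq] at hbf'
          obtain ⟨huv, hne, hdig⟩ := hbf'
          have hcu : bUpper c = true := by rcases huv with rfl | rfl <;> decide
          have huvb : (['U','V'].contains ((c :: rest).headD ' ')) = true := by
            rcases huv with rfl | rfl <;> rfl
          -- the last char of the list is the last char of the digit tail, hence a digit
          have hlast : bDigit ((c :: rest).getLastD ' ') = true := by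
            have hne' : rest.dropWhile bUpper ≠ [] := by
              simpa [List.isEmpty_iff] using hne
            obtain ⟨x, hx⟩ := Option.ne_none_iff_exists'.mp
              (mt List.getLast?_eq_none_iff.mp hne' : (rest.dropWhile bUpper).getLast? ≠ none)
            have hxd : bDigit x = true := List.all_eq_true.mp hdig x (List.mem_of_getLast? hx)
            have hrest : rest.getLast? = some x := by
              rw [← List.takeWhile_append_dropWhile (p := bUpper) (l := rest),
                List.getLast?_append, hx]
              rfl
            rw [List.getLastD_cons, List.getLastD_eq_getLast?, hrest]
            simpa using hxd
          have hmem : (c :: rest).getLastD ' ' ∈ c :: rest := by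
            rw [List.getLastD_eq_getLast?]
            cases hr : (c :: rest).getLast? with
            | none => simp at hr
            | some y => exact List.mem_of_getLast? (by simpa using hr)
          have hint : (PySem.Int.ofChars? [(c :: rest).getLastD ' ']).isNone = false := by
            rw [ofChars_single _ (hall _ hmem), hlast]; rfl
          have hloop : aLoop2 (c :: rest) true = true := by
            rw [aLoop2_true _ hall]
            simpa [List.dropWhile_cons_of_pos hcu] using hdig
          rw [hallA, h2, huvb, hint, hloop, h2']
          rfl
        | false =>
          -- B rejects: show some factor of A's chain is false
          rw [Bool.false_and]
          by_cases hall : ((c :: rest).all (fun x => ((upperletters ++ numbers).toList).contains x)) = true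
          · have hall' : ∀ x ∈ c :: rest, (bUpper x || bDigit x) = true := by
              simpa only [List.all_eq_true, allowC_eq] using hall
            by_cases huv : (['U','V'].contains ((c :: rest).headD ' ')) = true
            · have huv' : c = 'U' ∨ c = 'V' := by simpa using huv
              have hcu : bUpper c = true := by rcases huv' with rfl | rfl <;> decide
              by_cases hint : (PySem.Int.ofChars? [(c :: rest).getLastD ' ']).isNone = true
              · rw [hint]
                simp only [Bool.not_true, Bool.and_false, Bool.false_and]
              · have hmem : (c :: rest).getLastD ' ' ∈ c :: rest := by
                  rw [List.getLastD_eq_getLast?]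
                  cases hr : (c :: rest).getLast? with
                  | none => simp at hr
                  | some y => exact List.mem_of_getLast? (by simpa using hr)
                have hlastd : bDigit ((c :: rest).getLastD ' ') = true := by
                  have h := ofChars_single _ (hall' _ hmem)
                  rw [h] at hint
                  simpa using hint
                have hloop : aLoop2 (c :: rest) true = false := by
                  rw [aLoop2_true _ hall']
                  rw [List.dropWhile_cons_of_pos hcu]
                  by_cases hd : (rest.dropWhile bUpper).all bDigit = true
                  · exfalso
                    have hne : (rest.dropWhile bUpper).isEmpty = false := by
                      cases he : rest.dropWhile bUpper with
                      | nil =>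
                        exfalso
                        have hallup := List.dropWhile_eq_nil_iff.mp he
                        rcases List.mem_cons.mp hmem with heq | hmem'
                        · rw [heq, upper_not_digit c hcu] at hlastd; cases hlastd
                        · rw [upper_not_digit _ (hallup _ hmem')] at hlastd; cases hlastd
                      | cons a as => rfl
                    have hfm : bFullmatch (c :: rest) = true := by
                      simp only [bFullmatch, hne, hd, Bool.not_false, Bool.and_true]
                      rcases huv' with rfl | rfl <;> decide
                    rw [hfm] at hbf; cases hbf
                  · simpa using hd
                rw [hloop, Bool.and_false]
            · have huv0 : (['U','V'].contains ((c :: rest).headD ' ')) = false := by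
                simpa using huv
              rw [huv0, Bool.and_false, Bool.false_and, Bool.false_and]
          · have hall0 : ((c :: rest).all (fun x => ((upperletters ++ numbers).toList).contains x)) = false := by
              simpa using hall
            rw [hall0, Bool.false_and, Bool.false_and, Bool.false_and, Bool.false_and]

-- ===== VERDICT (by name: the statement is the Claim_ definition above) =====
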